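-- pv_equiv track=rewrite | github.com/shudaGutHub/saleem-andrew | x8313/__init__.py | expandCombinations
-- ===== SOURCE A (Python) =====
-- def expandCombinations(ticket):
--     ''' Given a ticket which can have multiple ids at a given position, expand that out into all the possible combinations it represents. '''
--     ret = [[]]
--     for runnersAtPos in ticket:
--         # Go through each result in the current result list and extend each result if it makes sense to
--         ix = 0
--         size = len(ret)
--         while ix < size:
--             currentResult = ret[ix]
--             if len(runnersAtPos) == 1:
--                 # One runner, just extend the current list
--                 runner = runnersAtPos[0]
--                 if runner in currentResult:
--                     del ret[ix]
--                     size -= 1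
--                 else:
--                     currentResult.append(runner)
--                     ix += 1
--             else:
--                 # Multiple runners, remove the existing and insert new
--                 del ret[ix]
--                 size -= 1
--                 for runner in runnersAtPos:
--                     if not runner in currentResult:
--                         newResult = list(currentResult)
--                         newResult.append(runner)
--                         ret.append(newResult)
--     return [tuple(x) for x in ret]
-- ===== SOURCE B (Python) =====
-- def expandCombinations(ticket):
--     ''' Given a ticket which can have multiple ids at a given position, expand that out into all the possible combinations it represents. '''
--     def product(positions):
--         if not positions:
--             return [()]
--         return [(r,) + rest for r in positions[0] for rest in product(positions[1:])]
--     return [combo for combo in product(ticket) if len(set(combo)) == len(combo)]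
-- ===== Notes on version B (the rewrite author's own statement) =====
-- stated objective: simpler
-- what changed: Replaces A's in-place extend-and-prune over a mutable result list (index/size bookkeeping, del/append) with generating the full Cartesian product recursively and filtering out tuples with repeated runners.
import Mathlib
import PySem

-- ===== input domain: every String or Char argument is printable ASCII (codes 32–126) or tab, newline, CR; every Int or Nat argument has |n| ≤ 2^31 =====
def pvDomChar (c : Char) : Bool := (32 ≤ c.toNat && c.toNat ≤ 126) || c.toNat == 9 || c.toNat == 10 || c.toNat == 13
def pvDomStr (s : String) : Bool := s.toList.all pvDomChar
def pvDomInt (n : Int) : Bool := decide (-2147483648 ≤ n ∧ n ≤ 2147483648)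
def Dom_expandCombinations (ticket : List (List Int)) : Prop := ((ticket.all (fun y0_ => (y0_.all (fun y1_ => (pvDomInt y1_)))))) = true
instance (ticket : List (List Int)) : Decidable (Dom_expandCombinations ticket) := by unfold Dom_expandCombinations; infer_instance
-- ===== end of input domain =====

-- B replaces A's in-place extend-and-prune over a mutable result list with a recursive
-- Cartesian product followed by a duplicate filter (objective: simpler); same return value.

-- ===== PORT A =====
-- the inner 'while ix < size' loop of A, for one position's runner list;
-- state: ret (the mutable list), ix, size — exactly A's variables
def expandLoopA (runners : List Int) (ret : List (List Int)) (ix size : Nat) :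
    List (List Int) :=
  if _h : ix < size then
    match ret[ix]? with
    | none => ret   -- dead branch: in A's use ix < size ≤ ret.length, so indexing succeeds
    | some currentResult =>
      if runners.length = 1 then
        -- one runner, extend in place or delete
        let runner := runners.headD 0   -- runnersAtPos[0]; list is nonempty here
        if currentResult.contains runner then
          expandLoopA runners (ret.eraseIdx ix) ix (size - 1)
        else
          expandLoopA runners (ret.set ix (currentResult ++ [runner])) (ix + 1) size
      else
        -- multiple runners: remove the existing and append the new results
        expandLoopA runners
          (runners.foldl
            (fun acc runner =>
              if currentResult.contains runner then acc
              else acc ++ [currentResult ++ [runner]])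
            (ret.eraseIdx ix))
          ix (size - 1)
  else ret
termination_by size - ix
decreasing_by all_goals omega

def expandCombinations (ticket : List (List Int)) : List (List Int) :=
  (ticket.foldl (fun ret runnersAtPos => expandLoopA runnersAtPos ret 0 ret.length)
    [[]]).map (fun x => x)

-- ===== PORT B =====
-- recursive Cartesian product, as in Source B's `product` helper
def prodB : List (List Int) → List (List Int)
  | [] => [[]]
  | pos :: rest => pos.flatMap (fun r => (prodB rest).map (fun c => r :: c))

def expandCombinations_alt (ticket : List (List Int)) : List (List Int) :=
  (prodB ticket).filter (fun combo =>
    PySem.Set.len (PySem.Set.ofList combo) == (combo.length : Int))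

-- ===== PRECONDITION & SPEC =====
def Spec_expandCombinations (ticket : List (List Int)) (out : List (List Int)) : Prop := out = expandCombinations_alt ticket
instance (ticket : List (List Int)) (out : List (List Int)) : Decidable (Spec_expandCombinations ticket out) := by unfold Spec_expandCombinations; infer_instance

-- ===== CLAIM (what is proved, stated in full; the proofs are below) =====
def Claim_equal_expandCombinations : Prop := ∀ (ticket : List (List Int)), Dom_expandCombinations ticket → Spec_expandCombinations ticket (expandCombinations ticket)

-- ===== LEMMAS AND PROOFS =====

-- what one pass of A's while loop contributes for a single surviving result
def extOne (runners : List Int) (cur : List Int) : List (List Int) :=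
  (runners.filter (fun r => !cur.contains r)).map (fun r => cur ++ [r])

-- "c extends cur without ever repeating an element" (checked left to right)
def distExt (cur : List Int) : List Int → Bool
  | [] => true
  | r :: c => !cur.contains r && distExt (cur ++ [r]) c

lemma eraseIdx_append_mid (l1 l : List (List Int)) (x : List Int) :
    (l1 ++ x :: l).eraseIdx l1.length = l1 ++ l := by
  induction l1 with
  | nil => simp
  | cons a t ih => simp [ih]

lemma expandLoopA_multi (runners : List Int) (hr : runners.length ≠ 1) :
    ∀ (pending appended : List (List Int)),
      expandLoopA runners (pending ++ appended) 0 pending.length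
        = appended ++ pending.flatMap (extOne runners) := by
  intro pending
  induction pending with
  | nil => intro appended; simp [expandLoopA]
  | cons cur rest ih =>
    intro appended
    rw [expandLoopA]
    simp only [Nat.succ_sub_one, List.length_cons, Nat.zero_lt_succ, dite_true, hr,
      List.cons_append, List.getElem?_cons_zero, if_false]
    have hfun : (fun (acc : List (List Int)) runner =>
          if cur.contains runner = true then acc else acc ++ [cur ++ [runner]])
        = (fun acc x => if (!cur.contains x) = true then acc ++ [cur ++ [x]] else acc) := by
      funext acc x
      by_cases hx : cur.contains x <;> simp [hx]
    rw [hfun, PySem.List.foldl_append_if (fun r => !cur.contains r)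
      (fun r => cur ++ [r]) runners ((cur :: (rest ++ appended)).eraseIdx 0)]
    simp only [List.eraseIdx_cons_zero]
    rw [List.append_assoc,
      show (List.map (fun r => cur ++ [r]) (List.filter (fun r => !cur.contains r) runners))
        = extOne runners cur from rfl,
      ih (appended ++ extOne runners cur)]
    simp [extOne, List.flatMap_cons]

lemma expandLoopA_single (r : Int) :
    ∀ (pending done : List (List Int)),
      expandLoopA [r] (done ++ pending) done.length (done.length + pending.length)
        = done ++ pending.flatMap (extOne [r]) := by
  intro pending
  induction pending with
  | nil => intro done; simp [expandLoopA]
  | cons cur rest ih =>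
    intro done
    rw [expandLoopA]
    have hlt : done.length < done.length + (cur :: rest).length := by simp
    simp only [hlt, dite_true]
    rw [List.getElem?_append_right (le_refl _)]
    simp only [Nat.sub_self, List.getElem?_cons_zero, List.length_singleton, if_true,
      List.headD_cons]
    by_cases hc : cur.contains r
    · have hr : r ∈ cur := by simpa using hc
      simp only [hc, if_true]
      have : done.length + (cur :: rest).length - 1 = done.length + rest.length := by
        simp only [List.length_cons]; omega
      rw [this, eraseIdx_append_mid, ih done]
      simp [extOne, hr, List.flatMap_cons]
    · have hr : r ∉ cur := by simpa using hc
      simp only [hc, Bool.false_eq_true, if_false]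
      have hset : (done ++ cur :: rest).set done.length (cur ++ [r])
          = (done ++ [cur ++ [r]]) ++ rest := by
        simp [List.set_append_right]
      have hix : done.length + 1 = (done ++ [cur ++ [r]]).length := by simp
      have hsz : done.length + (cur :: rest).length
          = (done ++ [cur ++ [r]]).length + rest.length := by
        simp only [List.length_cons, List.length_append, List.length_nil]; omega
      rw [hset, hix, hsz, ih (done ++ [cur ++ [r]])]
      simp [extOne, hr, List.flatMap_cons]

lemma expandLoopA_step (runners : List Int) (ret : List (List Int)) :
    expandLoopA runners ret 0 ret.length = ret.flatMap (extOne runners) := by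
  by_cases hr : runners.length = 1
  · obtain ⟨r, rfl⟩ := List.length_eq_one_iff.mp hr
    have := expandLoopA_single r ret []
    simpa using this
  · have := expandLoopA_multi runners hr ret []
    simpa using this

lemma distExt_iff (c : List Int) : ∀ cur : List Int,
    distExt cur c = true ↔ c.Nodup ∧ ∀ x ∈ c, x ∉ cur := by
  induction c with
  | nil => intro cur; simp [distExt]
  | cons r c ih =>
    intro cur
    constructor
    · intro h
      simp only [distExt, Bool.and_eq_true] at h
      obtain ⟨h1, h2⟩ := h
      have hr : r ∉ cur := by simpa using h1
      obtain ⟨hn, hall⟩ := (ih (cur ++ [r])).mp h2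
      refine ⟨List.nodup_cons.mpr ⟨fun hm => (hall r hm) (by simp), hn⟩, ?_⟩
      intro x hx
      rcases List.mem_cons.mp hx with rfl | hx'
      · exact hr
      · exact fun hxc => hall x hx' (by simp [hxc])
    · rintro ⟨hn, hall⟩
      simp only [distExt, Bool.and_eq_true]
      obtain ⟨hrc, hn'⟩ := List.nodup_cons.mp hn
      refine ⟨by simpa using hall r (by simp), ?_⟩
      refine (ih (cur ++ [r])).mpr ⟨hn', ?_⟩
      intro x hx hxm
      rcases List.mem_append.mp hxm with h' | h'
      · exact hall x (List.mem_cons_of_mem _ hx) h'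
      · exact hrc (by rwa [List.mem_singleton.mp h'] at hx)

-- PySem.Set.ofList xs is an order-preserving sublist of xs disjoint from the accumulator
lemma foldl_add_sublist (c : List Int) : ∀ acc : List Int,
    ∃ d, d.Sublist c ∧ c.foldl PySem.Set.add acc = acc ++ d := by
  induction c with
  | nil => intro acc; exact ⟨[], by simp⟩
  | cons x c ih =>
    intro acc
    by_cases hx : x ∈ acc
    · obtain ⟨d, hd, he⟩ := ih acc
      have hadd : PySem.Set.add acc x = acc := by simp [PySem.Set.add, hx]
      refine ⟨d, hd.cons x, ?_⟩
      rw [List.foldl_cons, hadd]; exact he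
    · obtain ⟨d, hd, he⟩ := ih (acc ++ [x])
      have hadd : PySem.Set.add acc x = acc ++ [x] := by simp [PySem.Set.add, hx]
      refine ⟨x :: d, hd.cons₂ x, ?_⟩
      rw [List.foldl_cons, hadd, he]; simp

lemma ofList_length_eq_iff (c : List Int) :
    (PySem.Set.ofList c).length = c.length ↔ c.Nodup := by
  constructor
  · intro h
    obtain ⟨d, hd, he⟩ := foldl_add_sublist c []
    have hof : PySem.Set.ofList c = d := by simpa using he
    have hdc : d = c := hd.eq_of_length (by rw [← hof, h])
    have hnd := PySem.Set.nodup_ofList c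
    rwa [hof, hdc] at hnd
  · intro h; rw [PySem.Set.ofList_eq_self_of_nodup c h]

lemma filter_cond_eq (c : List Int) :
    (PySem.Set.len (PySem.Set.ofList c) == (c.length : Int)) = distExt [] c := by
  have h1 : (PySem.Set.len (PySem.Set.ofList c) == (c.length : Int)) = true
      ↔ c.Nodup := by
    simp [PySem.Set.len, ofList_length_eq_iff]
  have h2 : distExt [] c = true ↔ c.Nodup := by
    simp [distExt_iff]
  by_cases h : c.Nodup
  · rw [h1.mpr h, h2.mpr h]
  · rw [Bool.eq_iff_iff, h1, h2]

lemma flatMap_filter_ite (l : List Int) (p : Int → Bool) (g : Int → List (List Int)) :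
    (l.filter p).flatMap g = l.flatMap (fun x => if p x then g x else []) := by
  induction l with
  | nil => simp
  | cons x l ih =>
    by_cases h : p x <;> simp [List.filter_cons, h, ih]

lemma foldl_flatMap_prodB : ∀ (t : List (List Int)) (acc : List (List Int)),
    t.foldl (fun ret runners => ret.flatMap (extOne runners)) acc
      = acc.flatMap (fun cur => ((prodB t).filter (distExt cur)).map (cur ++ ·)) := by
  intro t
  induction t with
  | nil =>
    intro acc
    simp [prodB, distExt, List.filter]
  | cons pos rest ih =>
    intro acc
    rw [List.foldl_cons, ih (acc.flatMap (extOne pos)), List.flatMap_assoc]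
    refine List.flatMap_congr fun cur _ => ?_
    simp only [extOne, List.flatMap_map]
    rw [flatMap_filter_ite]
    simp only [prodB, List.filter_flatMap, List.filter_map, List.map_flatMap, List.map_map]
    refine List.flatMap_congr fun r _ => ?_
    by_cases h : cur.contains r
    · have hrc : r ∈ cur := by simpa using h
      have hd : ∀ c : List Int, distExt cur (r :: c) = false := by
        intro c; simp [distExt, hrc]
      simp [Function.comp_def, hd]
      exact fun hx => absurd hrc hx
    · have hrc : r ∉ cur := by simpa using h
      have hd : ∀ c : List Int, distExt cur (r :: c) = distExt (cur ++ [r]) c := by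
        intro c; simp [distExt, hrc]
      simp [Function.comp_def, hd, List.append_assoc]
      exact fun hx => absurd hx hrc

-- ===== VERDICT (by name: the statement is the Claim_ definition above) =====
theorem expandCombinations_spec : Claim_equal_expandCombinations := by
  intro ticket _
  show expandCombinations ticket = expandCombinations_alt ticket
  unfold expandCombinations expandCombinations_alt
  have hstep : (fun (ret : List (List Int)) runnersAtPos =>
        expandLoopA runnersAtPos ret 0 ret.length)
      = fun ret runners => ret.flatMap (extOne runners) :=
    funext fun ret => funext fun runners => expandLoopA_step runners ret
  rw [List.map_id', hstep, foldl_flatMap_prodB ticket [[]]]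
  simp
  exact (List.filter_congr fun c _ => filter_cond_eq c).symm
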